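-- pv_equiv track=rewrite | github.com/queelius/computational-explorations | src/set_theory_attacks.py | compute_sunflower_number
-- ===== SOURCE A (Python) =====
-- from itertools import combinations, product as iproduct
-- from typing import Dict, FrozenSet, List, Optional, Set, Tuple
--
-- def is_sunflower(family: List[FrozenSet[int]], r: int) -> Optional[List[int]]:
--     """
--     Check if family contains a sunflower with r petals.
--
--     Returns indices of the r sunflower members if found, None otherwise.
--     """
--     if len(family) < r:
--         return None
--
--     for indices in combinations(range(len(family)), r):
--         sets = [family[i] for i in indices]
--         # Compute pairwise intersections
--         kernel = sets[0]
--         for s in sets[1:]: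
--             kernel = kernel & s
--
--         # Check: every pair intersects exactly in the kernel
--         is_sf = True
--         for i in range(len(sets)):
--             for j in range(i + 1, len(sets)):
--                 if sets[i] & sets[j] != kernel:
--                     is_sf = False
--                     break
--             if not is_sf:
--                 break
--
--         if is_sf:
--             return list(indices)
--
--     return None
--
-- def sunflower_free_family(k: int, r: int, universe_size: int) -> List[FrozenSet[int]]:
--     """
--     Greedily build a maximal family of k-element subsets of [universe_size]
--     that avoids containing a sunflower with r petals.
--
--     Returns the maximal sunflower-free family.
--     """
--     universe = list(range(1, universe_size + 1))
--     family: List[FrozenSet[int]] = []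
--
--     for subset in combinations(universe, k):
--         candidate = frozenset(subset)
--         test_family = family + [candidate]
--         if is_sunflower(test_family, r) is None:
--             family.append(candidate)
--
--     return family
--
-- def compute_sunflower_number(k: int, r: int, max_universe: int = 0) -> Tuple[int, int]:
--     """
--     Compute f(k, r) exactly by exhaustive search.
--
--     Finds the minimum m such that every family of m k-element subsets must
--     contain a sunflower with r petals.  Equivalently, f(k,r) = 1 + max size
--     of a sunflower-free family.
--
--     We search over increasing universe sizes until the greedy bound
--     stabilizes.
--
--     Returns (f_value, max_sunflower_free_size).
--     """
--     if k == 0: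
--         return r, r - 1  # empty set: r copies form a sunflower with empty kernel
--
--     if max_universe <= 0:
--         # Heuristic universe size: Erdos-Rado bound tells us the answer is
--         # at most k!*(r-1)^k, and we need universe >= k * that many sets to
--         # have enough room.  But for exact computation we go modestly.
--         max_universe = min(3 * k * r, 20)
--
--     best = 0
--     for u in range(k, max_universe + 1):
--         family = sunflower_free_family(k, r, u)
--         if len(family) > best:
--             best = len(family)
--
--     return best + 1, best
-- ===== SOURCE B (Python) =====
-- def _ksubsets(lo, hi, k):
--     """All strictly increasing k-tuples from {lo..hi}, in lexicographic order,
--     grown breadth-first one position per round; prefixes that cannot be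
--     completed any more (fewer than rem values left) are pruned."""
--     partials = [((), lo)]
--     for rem in range(k, 0, -1):
--         partials = [(pref + (x,), x + 1)
--                     for (pref, start) in partials
--                     for x in range(start, hi - rem + 2)]
--     return [pref for (pref, _) in partials]
--
--
-- def _subs(items, m):
--     """All m-element sub-tuples of items (order of enumeration irrelevant)."""
--     if m == 0:
--         return [()]
--     if len(items) < m:
--         return []
--     rest = items[1:]
--     return _subs(rest, m) + [(items[0],) + t for t in _subs(rest, m - 1)]
--
--
-- def _is_sf(sets):
--     """Element-frequency sunflower test: a nonempty list of (distinct-element)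
--     sets is a sunflower iff every element lies in exactly one set or in all
--     of them."""
--     n = len(sets)
--     return all(sum(1 for t in sets if x in t) in (1, n)
--                for s in sets for x in s)
--
--
-- def compute_sunflower_number(k, r, max_universe=0):
--     if k == 0:
--         return r, r - 1
--
--     if max_universe <= 0:
--         max_universe = min(3 * k * r, 20)
--
--     sizes = []
--     for u in range(k, max_universe + 1):
--         family = []
--         for cand in _ksubsets(1, u, k):
--             # family is sunflower-free already, so a new sunflower must use
--             # cand: test only the (r-1)-subsets of family together with cand.
--             if not any(_is_sf(rest + (cand,)) for rest in _subs(tuple(family), r - 1)):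
--                 family.append(cand)
--         sizes.append(len(family))
--
--     best = max(sizes, default=0)
--     return best + 1, best
-- ===== Notes on version B (the rewrite author's own statement) =====
-- stated objective: alternative
-- what changed: B replaces A's per-step full scan (is_sunflower over all r-subsets of family+[candidate] with pairwise-intersection kernel checks) by testing only the (r-1)-subsets of the existing family together with the new candidate, judged sunflower by an element-frequency test (every element lies in one set or in all) instead of pairwise intersections, with its own recursive subset enumerators and a staged sizes-then-max outer pass.
import Mathlib
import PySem

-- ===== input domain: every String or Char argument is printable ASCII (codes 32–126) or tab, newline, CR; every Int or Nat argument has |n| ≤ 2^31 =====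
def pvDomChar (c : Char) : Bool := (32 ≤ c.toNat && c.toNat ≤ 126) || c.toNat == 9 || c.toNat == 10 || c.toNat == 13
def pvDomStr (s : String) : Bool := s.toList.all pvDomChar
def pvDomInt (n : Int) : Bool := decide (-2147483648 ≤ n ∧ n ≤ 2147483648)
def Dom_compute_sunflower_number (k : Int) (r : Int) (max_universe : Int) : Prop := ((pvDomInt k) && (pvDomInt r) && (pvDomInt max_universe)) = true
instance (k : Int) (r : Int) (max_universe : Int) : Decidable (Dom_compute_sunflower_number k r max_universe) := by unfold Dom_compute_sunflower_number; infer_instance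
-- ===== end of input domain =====

-- B tests, at each greedy step, only the (r-1)-subsets of the existing family
-- together with the new candidate (the family is already sunflower-free), and
-- decides 'sunflower' by an element-frequency test (every element is in exactly
-- one set or in all of them) instead of A's pairwise-intersection kernel scan.
-- Sets of ints are represented as strictly increasing List Int (they all arise
-- from combinations of range(1,u+1) and intersections thereof), on which
-- Python's frozenset equality coincides with list equality.

-- ===== PORT A =====
-- itertools.combinations(xs, m), in itertools' lexicographic-by-index order
def pvCombos {α : Type} (m : Nat) (xs : List α) : List (List α) :=
  match m, xs with
  | 0, _ => [[]]
  | _ + 1, [] => []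
  | m + 1, x :: rest =>
    if rest.length < m then []   -- itertools yields nothing when the size exceeds len(xs)
    else (pvCombos m rest).map (fun l => x :: l) ++ pvCombos (m + 1) rest

-- frozenset intersection a & b (exact on distinct-element lists)
def pvInter (a b : List Int) : List Int := a.filter (fun x => b.contains x)

-- the kernel computation + pairwise check of A's is_sunflower body;
-- the nested loop with early 'break' on a pure flag = all-pairs conjunction
def pvSF (sets : List (List Int)) : Bool :=
  let kernel := (sets.drop 1).foldl pvInter (sets.headD [])   -- kernel = sets[0]; for s in sets[1:]: kernel &= s
  (List.range sets.length).all (fun i =>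
    (List.range sets.length).all (fun j =>
      if i < j then pvInter (sets.getD i []) (sets.getD j []) == kernel else true))

-- is_sunflower: first r-index-combination forming a sunflower, if any
def pvIsSunflower (family : List (List Int)) (r : Int) : Option (List Nat) :=
  if (family.length : Int) < r then none
  else (pvCombos r.toNat (List.range family.length)).findSome? (fun idxs =>
    if pvSF (idxs.map (fun i => family.getD i [])) then some idxs else none)

-- sunflower_free_family
def pvSFF (k r u : Int) : List (List Int) :=
  (pvCombos k.toNat (PySem.List.pyRange 1 (u + 1) 1)).foldl
    (fun fam cand =>
      if pvIsSunflower (fam ++ [cand]) r = none then fam ++ [cand] else fam) []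

def compute_sunflower_number (k : Int) (r : Int) (max_universe : Int) : Int × Int :=
  if k = 0 then (r, r - 1)
  else
    let mu := if max_universe ≤ 0 then min (3 * k * r) 20 else max_universe
    let best := (PySem.List.pyRange k (mu + 1) 1).foldl
      (fun best u =>
        let family := pvSFF k r u
        if (family.length : Int) > best then (family.length : Int) else best) 0
    (best + 1, best)

-- ===== PORT B =====
-- _ksubsets(lo, hi, k): increasing k-tuples from {lo..hi}, grown breadth-first
-- one position per round (pruned to prefixes that can still be completed)
def altLevel (hi rem : Int) (ps : List (List Int × Int)) : List (List Int × Int) :=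
  ps.flatMap (fun p =>
    (PySem.List.pyRange p.2 (hi - rem + 2) 1).map (fun x => (p.1 ++ [x], x + 1)))

def altKSub (k : Nat) (lo hi : Int) : List (List Int) :=
  ((PySem.List.pyRange (k : Int) 0 (-1)).foldl
    (fun ps rem => altLevel hi rem ps) [([], lo)]).map (fun p => p.1)

-- _subs(items, m): m-element sub-tuples of a list of sets
def altSubs : Nat → List (List Int) → List (List (List Int))
  | 0, _ => [[]]
  | _ + 1, [] => []   -- len(items) < m: nothing to choose
  | m + 1, x :: rest =>
    if rest.length < m then []   -- len(items) < m guard of _subs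
    else altSubs (m + 1) rest ++ (altSubs m rest).map (fun t => x :: t)

-- _is_sf: element-frequency sunflower test
def altSF (sets : List (List Int)) : Bool :=
  sets.all (fun s => s.all (fun x =>
    let c := sets.countP (fun t => t.contains x)   -- sum(1 for t in sets if x in t)
    c == 1 || c == sets.length))

-- the candidate loop, as structural recursion over the candidate list
def altGo (r : Int) (fam : List (List Int)) : List (List Int) → List (List Int)
  | [] => fam
  | c :: cs =>
    if (altSubs (r - 1).toNat fam).any (fun rest => altSF (rest ++ [c]))
    then altGo r fam cs
    else altGo r (fam ++ [c]) cs

def compute_sunflower_number_alt (k : Int) (r : Int) (max_universe : Int) : Int × Int :=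
  if k = 0 then (r, r - 1)
  else
    let mu := if max_universe ≤ 0 then min (3 * k * r) 20 else max_universe
    let sizes := (PySem.List.pyRange k (mu + 1) 1).map
      (fun u => ((altGo r [] (altKSub k.toNat 1 u)).length : Int))
    let best := sizes.foldl max 0   -- max(sizes, default=0): all sizes are ≥ 0
    (best + 1, best)

-- ===== PRECONDITION & SPEC =====
-- Pre_ excludes exactly the inputs on which A raises (ValueError/IndexError from
-- combinations with a negative size or sets[0] on an empty list): k ≠ 0 with
-- (k < 0 or r ≤ 0) and a nonempty universe loop.  A returns on everything else.
def Pre_compute_sunflower_number (k : Int) (r : Int) (max_universe : Int) : Prop :=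
  k = 0 ∨ (1 ≤ k ∧ 1 ≤ r) ∨ ((if max_universe ≤ 0 then min (3 * k * r) 20 else max_universe) < k)
instance (k : Int) (r : Int) (max_universe : Int) : Decidable (Pre_compute_sunflower_number k r max_universe) := by unfold Pre_compute_sunflower_number; infer_instance

def pvWitness_compute_sunflower_number : Int × Int × Int := (2, 2, 4)

def Spec_compute_sunflower_number (k : Int) (r : Int) (max_universe : Int) (out : Int × Int) : Prop := out = compute_sunflower_number_alt k r max_universe
instance (k : Int) (r : Int) (max_universe : Int) (out : Int × Int) : Decidable (Spec_compute_sunflower_number k r max_universe out) := by unfold Spec_compute_sunflower_number; infer_instance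

-- ===== CLAIM (what is proved, stated in full; the proofs are below) =====
def Claim_equal_compute_sunflower_number : Prop := ∀ (k : Int) (r : Int) (max_universe : Int), Dom_compute_sunflower_number k r max_universe → Pre_compute_sunflower_number k r max_universe → Spec_compute_sunflower_number k r max_universe (compute_sunflower_number k r max_universe)

-- ===== LEMMAS AND PROOFS =====

-- membership in pvCombos = sublists of the given length
theorem pv_mem_combos {α : Type} (m : Nat) (xs l : List α) :
    l ∈ pvCombos m xs ↔ List.Sublist l xs ∧ l.length = m := by
  induction xs generalizing m l with
  | nil =>
    cases m with
    | zero => simp [pvCombos, List.sublist_nil]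
    | succ n =>
      simp only [pvCombos, List.not_mem_nil, false_iff, not_and]
      intro hs
      simp [List.sublist_nil.mp hs]
  | cons x rest ih =>
    cases m with
    | zero =>
      simp only [pvCombos, List.mem_singleton]
      constructor
      · rintro rfl
        exact ⟨List.nil_sublist _, rfl⟩
      · rintro ⟨_, hlen⟩
        exact (List.length_eq_zero_iff.mp hlen)
    | succ n =>
      by_cases hg : rest.length < n
      · simp only [pvCombos, if_pos hg, List.not_mem_nil, false_iff, not_and]
        intro hs hlen
        have := hs.length_le
        simp at this
        omega
      · simp only [pvCombos, if_neg hg, List.mem_append, List.mem_map, ih, List.sublist_cons_iff]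
        constructor
        · rintro (⟨l', ⟨hs, hlen⟩, rfl⟩ | ⟨hs, hlen⟩)
          · exact ⟨Or.inr ⟨l', rfl, hs⟩, by simp [hlen]⟩
          · exact ⟨Or.inl hs, hlen⟩
        · rintro ⟨hs | ⟨l', rfl, hs⟩, hlen⟩
          · exact Or.inr ⟨hs, hlen⟩
          · exact Or.inl ⟨l', ⟨hs, by simpa using hlen⟩, rfl⟩

theorem pv_combos_map {α β : Type} (f : α → β) (m : Nat) (xs : List α) :
    pvCombos m (xs.map f) = (pvCombos m xs).map (List.map f) := by
  induction xs generalizing m with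
  | nil => cases m <;> simp [pvCombos]
  | cons x rest ih =>
    cases m with
    | zero => simp [pvCombos]
    | succ n =>
      by_cases hg : rest.length < n
      · simp [pvCombos, hg]
      · simp [pvCombos, hg, ih, List.map_map]

theorem pv_combos_nil_of_short {α : Type} (m : Nat) (xs : List α) (h : xs.length < m) :
    pvCombos m xs = [] := by
  rcases List.eq_nil_or_concat (pvCombos m xs) with he | ⟨l, a, hc⟩
  · exact he
  · exfalso
    have hm : a ∈ pvCombos m xs := by simp [hc]
    obtain ⟨hs, hlen⟩ := (pv_mem_combos m xs a).mp hm
    have := hs.length_le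
    omega

-- pvCombos at a successor size, with the length guard absorbed
theorem pv_combos_succ {α : Type} (m : Nat) (x : α) (rest : List α) :
    pvCombos (m + 1) (x :: rest)
      = (pvCombos m rest).map (fun l => x :: l) ++ pvCombos (m + 1) rest := by
  by_cases h : rest.length < m
  · rw [pv_combos_nil_of_short m rest h, pv_combos_nil_of_short (m + 1) rest (by omega)]
    simp [pvCombos, h]
  · simp [pvCombos, h]

theorem pv_self_eq_map_range (xs : List (List Int)) :
    xs = (List.range xs.length).map (fun i => xs.getD i []) := by
  apply List.ext_getElem (by simp)
  intro i h1 h2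
  have h1' : i < xs.length := h1
  simp [List.getD_eq_getElem?_getD, List.getElem?_eq_getElem h1']

-- pvCombos over a range, one level peeled off, with the pruned upper bound
theorem pv_combos_range_step (m : Nat) (hi : Int) : ∀ s : Int,
    pvCombos (m + 1) (PySem.List.pyRange s (hi + 1) 1)
      = (PySem.List.pyRange s (hi - m + 1) 1).flatMap
          (fun x => (pvCombos m (PySem.List.pyRange (x + 1) (hi + 1) 1)).map
            (fun l => x :: l)) := by
  suffices H : ∀ (n : Nat) (s : Int), (hi - m + 1 - s).toNat ≤ n →
      pvCombos (m + 1) (PySem.List.pyRange s (hi + 1) 1)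
        = (PySem.List.pyRange s (hi - m + 1) 1).flatMap
            (fun x => (pvCombos m (PySem.List.pyRange (x + 1) (hi + 1) 1)).map
              (fun l => x :: l)) by
    exact fun s => H (hi - m + 1 - s).toNat s le_rfl
  intro n
  induction n with
  | zero =>
    intro s h
    have hle : hi - (m : Int) + 1 ≤ s := by omega
    rw [PySem.List.pyRange_one_eq_nil hle, List.flatMap_nil]
    apply pv_combos_nil_of_short
    rw [PySem.List.length_pyRange_one]
    omega
  | succ n ihn =>
    intro s h
    by_cases hlt : s < hi - m + 1
    · have hlt2 : s < hi + 1 := by omega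
      rw [PySem.List.pyRange_one_cons hlt2, pv_combos_succ,
          PySem.List.pyRange_one_cons hlt, List.flatMap_cons]
      congr 1
      exact ihn (s + 1) (by omega)
    · have hle : hi - (m : Int) + 1 ≤ s := by omega
      rw [PySem.List.pyRange_one_eq_nil hle, List.flatMap_nil]
      apply pv_combos_nil_of_short
      rw [PySem.List.length_pyRange_one]
      omega

-- reading of a partials list: each prefix extended by every completion
def altInterp (hi : Int) (t : Nat) (ps : List (List Int × Int)) : List (List Int) :=
  ps.flatMap (fun p =>
    (pvCombos t (PySem.List.pyRange p.2 (hi + 1) 1)).map (fun l => p.1 ++ l))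

theorem alt_level_interp (hi : Int) (t : Nat) (ps : List (List Int × Int)) :
    altInterp hi t (altLevel hi ((t : Int) + 1) ps) = altInterp hi (t + 1) ps := by
  unfold altInterp altLevel
  rw [List.flatMap_assoc]
  congr 1
  funext p
  rw [List.flatMap_map]
  have harg : hi - ((t : Int) + 1) + 2 = hi - t + 1 := by ring
  rw [harg, pv_combos_range_step t hi p.2, List.map_flatMap]
  congr 1
  funext x
  simp

theorem alt_fold (hi : Int) : ∀ (t : Nat) (ps : List (List Int × Int)),
    ((PySem.List.pyRange (t : Int) 0 (-1)).foldl
      (fun ps rem => altLevel hi rem ps) ps).map (fun p => p.1) = altInterp hi t ps := by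
  intro t
  induction t with
  | zero =>
    intro ps
    rw [Nat.cast_zero, PySem.List.pyRange_neg_one_eq_nil (le_refl 0)]
    simp only [altInterp, pvCombos, List.foldl_nil, List.map_cons, List.map_nil,
      List.append_nil]
    induction ps with
    | nil => rfl
    | cons p ps ihp => simp [ihp]
  | succ t ih =>
    intro ps
    have hcast : ((t + 1 : Nat) : Int) = (t : Int) + 1 := by push_cast; ring
    have hcons : PySem.List.pyRange ((t : Int) + 1) 0 (-1)
        = ((t : Int) + 1) :: PySem.List.pyRange ((t : Int) + 1 - 1) 0 (-1) :=
      PySem.List.pyRange_neg_one_cons (by omega)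
    have hsub : (t : Int) + 1 - 1 = (t : Int) := by ring
    rw [hcast, hcons, hsub, List.foldl_cons, ih, alt_level_interp]

-- B's level-wise enumerator produces exactly itertools' combination list
theorem alt_ksub_eq_combos (k : Nat) (lo hi : Int) :
    altKSub k lo hi = pvCombos k (PySem.List.pyRange lo (hi + 1) 1) := by
  unfold altKSub
  rw [alt_fold]
  simp [altInterp]

-- membership in altSubs = sublists of the given length
theorem alt_mem_subs (m : Nat) (xs l : List (List Int)) :
    l ∈ altSubs m xs ↔ List.Sublist l xs ∧ l.length = m := by
  induction xs generalizing m l with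
  | nil =>
    cases m with
    | zero => simp [altSubs, List.sublist_nil]
    | succ n =>
      simp only [altSubs, List.not_mem_nil, false_iff, not_and]
      intro hs
      simp [List.sublist_nil.mp hs]
  | cons x rest ih =>
    cases m with
    | zero =>
      simp only [altSubs, List.mem_singleton]
      constructor
      · rintro rfl
        exact ⟨List.nil_sublist _, rfl⟩
      · rintro ⟨_, hlen⟩
        exact (List.length_eq_zero_iff.mp hlen)
    | succ n =>
      by_cases hg : rest.length < n
      · simp only [altSubs, if_pos hg, List.not_mem_nil, false_iff, not_and]
        intro hs hlen
        have := hs.length_le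
        simp at this
        omega
      · simp only [altSubs, if_neg hg, List.mem_append, List.mem_map, ih, List.sublist_cons_iff]
        constructor
        · rintro (⟨hs, hlen⟩ | ⟨l', ⟨hs, hlen⟩, rfl⟩)
          · exact ⟨Or.inl hs, hlen⟩
          · exact ⟨Or.inr ⟨l', rfl, hs⟩, by simp [hlen]⟩
        · rintro ⟨hs | ⟨l', rfl, hs⟩, hlen⟩
          · exact Or.inl ⟨hs, hlen⟩
          · exact Or.inr ⟨l', ⟨hs, by simpa using hlen⟩, rfl⟩

-- intersection-as-filter membership and sortedness
theorem pv_mem_inter (a b : List Int) (x : Int) : x ∈ pvInter a b ↔ x ∈ a ∧ x ∈ b := by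
  simp [pvInter]

theorem pv_mem_kernel (a : List Int) (l : List (List Int)) (x : Int) :
    x ∈ l.foldl pvInter a ↔ x ∈ a ∧ ∀ s ∈ l, x ∈ s := by
  induction l generalizing a with
  | nil => simp
  | cons s l ih => simp [ih, pv_mem_inter]; tauto

theorem pv_inter_sublist (a b : List Int) : List.Sublist (pvInter a b) a :=
  List.filter_sublist

theorem pv_kernel_sublist (a : List Int) (l : List (List Int)) :
    List.Sublist (l.foldl pvInter a) a := by
  induction l generalizing a with
  | nil => exact List.Sublist.refl a
  | cons s l ih => exact (ih (pvInter a s)).trans (pv_inter_sublist a s)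

-- strictly sorted lists with the same members are equal
theorem pv_sorted_ext (a b : List Int) (ha : a.Pairwise (· < ·)) (hb : b.Pairwise (· < ·))
    (h : ∀ x, x ∈ a ↔ x ∈ b) : a = b := by
  have hna : a.Nodup := ha.imp (fun h => ne_of_lt h)
  have hnb : b.Nodup := hb.imp (fun h => ne_of_lt h)
  exact List.Perm.eq_of_pairwise
    (fun x y _ _ h1 h2 => absurd h2 (lt_asymm h1)) ha hb
    ((List.perm_ext_iff_of_nodup hna hnb).mpr h)

-- two members (as a length-2 sublist) witnessing countP ≥ 2
theorem pv_two_of_countP {α : Type} (p : α → Bool) (l : List α) (h : 1 < l.countP p) :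
    ∃ a b, List.Sublist [a, b] l ∧ p a = true ∧ p b = true := by
  induction l with
  | nil => simp at h
  | cons x l ih =>
    rw [List.countP_cons] at h
    by_cases hx : p x = true
    · rw [if_pos hx] at h
      by_cases h1 : 1 < l.countP p
      · obtain ⟨a, b, hs, hpa, hpb⟩ := ih h1
        exact ⟨a, b, hs.cons _, hpa, hpb⟩
      · have h0 : 0 < l.countP p := by omega
        obtain ⟨b, hb, hpb⟩ := List.countP_pos_iff.mp h0
        refine ⟨x, b, ?_, hx, hpb⟩
        exact (List.singleton_sublist.mpr hb).cons₂ x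
    · rw [if_neg hx] at h
      obtain ⟨a, b, hs, hpa, hpb⟩ := ih (by omega)
      exact ⟨a, b, hs.cons _, hpa, hpb⟩

theorem pv_countP_two {α : Type} (p : α → Bool) (l : List α) (a b : α)
    (hs : List.Sublist [a, b] l) (hpa : p a = true) (hpb : p b = true) :
    2 ≤ l.countP p := by
  have := hs.countP_le (p := p)
  simp [hpa, hpb] at this
  omega

-- the shared set-theoretic content: "every element is in one set or in all"
def pvAllOrOne (sets : List (List Int)) : Prop :=
  ∀ x a b, List.Sublist [a, b] sets → x ∈ a → x ∈ b → ∀ s ∈ sets, x ∈ s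

-- A's pairwise-kernel test, characterised
theorem pv_sf_iff (sets : List (List Int)) (hne : sets ≠ [])
    (hs : ∀ s ∈ sets, s.Pairwise (· < ·)) :
    pvSF sets = true ↔ pvAllOrOne sets := by
  unfold pvSF
  have hpair : ((List.range sets.length).all (fun i =>
      (List.range sets.length).all (fun j =>
        if i < j then pvInter (sets.getD i []) (sets.getD j []) ==
          (sets.drop 1).foldl pvInter (sets.headD []) else true)) = true)
      ↔ sets.Pairwise (fun a b => pvInter a b = (sets.drop 1).foldl pvInter (sets.headD [])) := by
    rw [List.pairwise_iff_getElem]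
    simp only [List.all_eq_true, List.mem_range]
    constructor
    · intro H i j hi hj hij
      have := H i hi j hj
      rw [if_pos hij] at this
      have hgi : sets.getD i [] = sets[i] := List.getD_eq_getElem _ _ hi
      have hgj : sets.getD j [] = sets[j] := List.getD_eq_getElem _ _ hj
      rw [hgi, hgj] at this
      exact beq_iff_eq.mp this
    · intro H i hi j hj
      by_cases hij : i < j
      · rw [if_pos hij]
        have hgi : sets.getD i [] = sets[i] := List.getD_eq_getElem _ _ hi
        have hgj : sets.getD j [] = sets[j] := List.getD_eq_getElem _ _ hj
        rw [hgi, hgj]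
        exact beq_iff_eq.mpr (H i j hi hj hij)
      · rw [if_neg hij]
    -- `List.all` vs the nested ifs
  rw [show ((List.range sets.length).all _ = true) ↔ _ from hpair,
      List.pairwise_iff_forall_sublist]
  -- membership form of kernel over the whole list
  have hkerM : ∀ x, x ∈ (sets.drop 1).foldl pvInter (sets.headD []) ↔ ∀ s ∈ sets, x ∈ s := by
    intro x
    rw [pv_mem_kernel]
    cases sets with
    | nil => exact absurd rfl hne
    | cons a l => simp
  constructor
  · intro H x a b hsub hxa hxb s hsmem
    have heq := H hsub
    have : x ∈ pvInter a b := (pv_mem_inter a b x).mpr ⟨hxa, hxb⟩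
    rw [heq] at this
    exact (hkerM x).mp this s hsmem
  · intro H a b hsub
    have hsa : a ∈ sets := hsub.subset (by simp)
    have hsb : b ∈ sets := hsub.subset (by simp)
    apply pv_sorted_ext
    · exact (hs a hsa).sublist (pv_inter_sublist a b)
    · cases sets with
      | nil => simp at hsa
      | cons c l =>
        exact (hs c (by simp)).sublist (pv_kernel_sublist _ _)
    · intro x
      rw [pv_mem_inter, hkerM x]
      constructor
      · rintro ⟨hxa, hxb⟩
        exact H x a b hsub hxa hxb
      · intro hall
        exact ⟨hall a hsa, hall b hsb⟩

-- B's frequency test, characterised by the same property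
theorem alt_sf_iff (sets : List (List Int)) :
    altSF sets = true ↔ pvAllOrOne sets := by
  unfold altSF
  simp only [List.all_eq_true, Bool.or_eq_true, beq_iff_eq]
  constructor
  · intro H x a b hsub hxa hxb s hsmem
    have hsa : a ∈ sets := hsub.subset (by simp)
    have h2 : 2 ≤ sets.countP (fun t => t.contains x) :=
      pv_countP_two _ _ a b hsub (by simpa using hxa) (by simpa using hxb)
    rcases H a hsa x hxa with h1 | hn
    · omega
    · have := List.countP_eq_length.mp hn s hsmem
      simpa using this
  · intro H s hsmem x hxs
    by_cases h2 : 1 < sets.countP (fun t => t.contains x)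
    · right
      obtain ⟨a, b, hsub, hpa, hpb⟩ := pv_two_of_countP _ _ h2
      apply List.countP_eq_length.mpr
      intro t htmem
      simpa using H x a b hsub (by simpa using hpa) (by simpa using hpb) t htmem
    · left
      have h1 : 0 < sets.countP (fun t => t.contains x) :=
        List.countP_pos_iff.mpr ⟨s, hsmem, by simpa using hxs⟩
      omega

theorem pv_sf_eq_alt (sets : List (List Int)) (hne : sets ≠ [])
    (hs : ∀ s ∈ sets, s.Pairwise (· < ·)) :
    pvSF sets = altSF sets := by
  rcases h : altSF sets with _ | _
  · rcases h' : pvSF sets with _ | _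
    · rfl
    · exact absurd ((alt_sf_iff sets).mpr ((pv_sf_iff sets hne hs).mp h')) (by simp [h])
  · exact (pv_sf_iff sets hne hs).mpr ((alt_sf_iff sets).mp h)

-- A's is_sunflower = none, in sublist language (for r ≥ 1)
theorem pv_none_iff_sub (fam : List (List Int)) (r : Int) (hr : 1 ≤ r) :
    pvIsSunflower fam r = none ↔
      ∀ t, List.Sublist t fam → t.length = r.toNat → pvSF t = false := by
  unfold pvIsSunflower
  have hbij : (pvCombos r.toNat (List.range fam.length)).map
      (List.map (fun i => fam.getD i [])) = pvCombos r.toNat fam := by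
    rw [← pv_combos_map]
    exact congrArg _ (pv_self_eq_map_range fam).symm
  split_ifs with h
  · constructor
    · intro _ t hsub hlen
      exfalso
      have := hsub.length_le
      omega
    · intro _; rfl
  · rw [List.findSome?_eq_none_iff]
    constructor
    · intro H t hsub hlen
      have ht : t ∈ pvCombos r.toNat fam := (pv_mem_combos _ _ _).mpr ⟨hsub, hlen⟩
      rw [← hbij] at ht
      obtain ⟨idxs, hidxs, rfl⟩ := List.mem_map.mp ht
      have h2 := H idxs hidxs
      by_contra hne'
      rw [Bool.not_eq_false] at hne'
      rw [if_pos hne'] at h2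
      exact absurd h2 (Option.some_ne_none idxs)
    · intro H idxs hidxs
      have hm : idxs.map (fun i => fam.getD i []) ∈ pvCombos r.toNat fam := by
        rw [← hbij]
        exact List.mem_map.mpr ⟨idxs, hidxs, rfl⟩
      obtain ⟨hsub, hlen⟩ := (pv_mem_combos _ _ _).mp hm
      have hf := H _ hsub hlen
      rw [if_neg]
      intro hcon
      rw [hf] at hcon
      exact absurd hcon (by decide)

-- core: for a family A's test already certifies sunflower-free, A's test on
-- family ++ [c] succeeds iff B's frequency test rejects every (r-1)-subset + c
theorem pv_add_iff (r : Int) (hr : 1 ≤ r) (fam : List (List Int)) (c : List Int)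
    (hfam : ∀ s ∈ fam, s.Pairwise (· < ·)) (hc : c.Pairwise (· < ·))
    (hinv : pvIsSunflower fam r = none) :
    (pvIsSunflower (fam ++ [c]) r = none) ↔
      ((altSubs (r - 1).toNat fam).any (fun rest => altSF (rest ++ [c])) = false) := by
  have hinv' := (pv_none_iff_sub fam r hr).mp hinv
  rw [pv_none_iff_sub _ r hr, List.any_eq_false]
  have hsorted : ∀ t, List.Sublist t fam → ∀ s ∈ t ++ [c], s.Pairwise (· < ·) := by
    intro t hsub s hsmem
    rcases List.mem_append.mp hsmem with h | h
    · exact hfam s (hsub.subset h)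
    · simpa [List.mem_singleton.mp h] using hc
  constructor
  · intro H rest hrest
    obtain ⟨hsub, hlen⟩ := (alt_mem_subs _ _ _).mp hrest
    have hfull : List.Sublist (rest ++ [c]) (fam ++ [c]) :=
      hsub.append (List.Sublist.refl [c])
    have hlenf : (rest ++ [c]).length = r.toNat := by simp [hlen]; omega
    have := H _ hfull hlenf
    rw [pv_sf_eq_alt _ (by simp) (hsorted rest hsub)] at this
    simp [this]
  · intro H t hsub hlen
    obtain ⟨l₁, l₂, rfl, hs1, hs2⟩ := List.sublist_append_iff.mp hsub
    rcases List.sublist_singleton.mp hs2 with rfl | rfl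
    · rw [List.append_nil] at *
      exact hinv' l₁ hs1 hlen
    · have hl1 : l₁.length = (r - 1).toNat := by
        simp at hlen
        omega
      have hmem : l₁ ∈ altSubs (r - 1).toNat fam :=
        (alt_mem_subs _ _ _).mpr ⟨hs1, hl1⟩
      have h0 := H _ hmem
      rw [pv_sf_eq_alt _ (by simp) (hsorted l₁ hs1)]
      simpa using h0

-- the greedy fold of A equals B's recursive candidate loop
theorem pv_fold_eq (r : Int) (hr : 1 ≤ r) (cs : List (List Int)) (fam : List (List Int))
    (hcs : ∀ c ∈ cs, c.Pairwise (· < ·)) (hfam : ∀ s ∈ fam, s.Pairwise (· < ·))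
    (hinv : pvIsSunflower fam r = none) :
    cs.foldl (fun fam cand =>
        if pvIsSunflower (fam ++ [cand]) r = none then fam ++ [cand] else fam) fam =
    altGo r fam cs := by
  induction cs generalizing fam with
  | nil => rfl
  | cons c cs ih =>
    have hc : c.Pairwise (· < ·) := hcs c (by simp)
    have hcs' : ∀ c' ∈ cs, c'.Pairwise (· < ·) := fun c' h => hcs c' (by simp [h])
    simp only [List.foldl_cons, altGo]
    by_cases h : pvIsSunflower (fam ++ [c]) r = none
    · have hb : (altSubs (r - 1).toNat fam).any (fun rest => altSF (rest ++ [c])) = false :=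
        (pv_add_iff r hr fam c hfam hc hinv).mp h
      rw [if_pos h, hb]
      simp only [Bool.false_eq_true, if_false]
      refine ih (fam ++ [c]) hcs' ?_ h
      intro s hsmem
      rcases List.mem_append.mp hsmem with hm | hm
      · exact hfam s hm
      · simpa [List.mem_singleton.mp hm] using hc
    · have hb : ¬ ((altSubs (r - 1).toNat fam).any (fun rest => altSF (rest ++ [c])) = false) :=
        fun hf => h ((pv_add_iff r hr fam c hfam hc hinv).mpr hf)
      rw [if_neg h]
      rw [Bool.not_eq_false] at hb
      rw [hb]
      simp only [if_true]
      exact ih fam hcs' hfam hinv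

theorem pv_greedy_eq (k r u : Int) (hr : 1 ≤ r) :
    pvSFF k r u = altGo r [] (altKSub k.toNat 1 u) := by
  unfold pvSFF
  rw [alt_ksub_eq_combos]
  apply pv_fold_eq r hr
  · intro c hc
    obtain ⟨hsub, _⟩ := (pv_mem_combos _ _ _).mp hc
    exact (PySem.List.pairwise_lt_pyRange_one 1 (u + 1)).sublist hsub
  · intro s hs
    simp at hs
  · unfold pvIsSunflower
    rw [if_pos (by simp; omega)]

-- A's running-max fold = max over the mapped size list
theorem pv_max_fold {α : Type} (f : α → Int) (l : List α) : ∀ b : Int,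
    l.foldl (fun b u => if f u > b then f u else b) b = (l.map f).foldl max b := by
  induction l with
  | nil => intro b; rfl
  | cons x l ih =>
    intro b
    simp only [List.foldl_cons, List.map_cons]
    rw [ih]
    congr 1
    rcases lt_or_ge b (f x) with h | h
    · rw [if_pos h, max_eq_right h.le]
    · rw [if_neg (not_lt.mpr h), max_eq_left h]

-- ===== VERDICT (by name: the statement is the Claim_ definition above) =====
theorem compute_sunflower_number_spec : Claim_equal_compute_sunflower_number := by
  intro k r mu _hdom hpre
  unfold Spec_compute_sunflower_number compute_sunflower_number compute_sunflower_number_alt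
  by_cases hk : k = 0
  · simp [hk]
  · rcases hpre with h0 | ⟨hk1, hr1⟩ | hlt
    · exact absurd h0 hk
    · rw [if_neg hk, if_neg hk]
      dsimp only
      rw [pv_max_fold]
      have : (fun u => ((pvSFF k r u).length : Int))
           = (fun u => ((altGo r [] (altKSub k.toNat 1 u)).length : Int)) :=
        funext (fun u => by rw [pv_greedy_eq k r u hr1])
      rw [this]
    · rw [if_neg hk, if_neg hk]
      dsimp only
      rw [PySem.List.pyRange_one_eq_nil (by omega)]
      rfl
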